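-- pv_equiv track=rewrite | github.com/Lucas12j/scraper-imoveis | library/get_data_brasilBrokers.py | data_cleaner
-- ===== SOURCE A (Python) =====
-- def data_cleaner(data):
--     data_cleaned = ""
--     check1 = False
--     check2 = False
--     check3 = False
--
--     for i in data:
--         if i == ">":
--             check1 = True
--         if i == "<" and check1 == True:
--             check2 = True
--
--         if check1 == True and check2 == False:
--             if i.isalnum() == True:
--                 check3 = True
--             if check3 == True:
--                 data_cleaned = data_cleaned+i
--     return (data_cleaned)
-- ===== SOURCE B (Python) =====
-- def data_cleaner(data):
--     _, sep, tail = data.partition(">")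
--     if not sep:
--         return ""
--     seg = tail.partition("<")[0]
--     for j, c in enumerate(seg):
--         if c.isalnum():
--             return seg[j:]
--     return ""
-- ===== Notes on version B (the rewrite author's own statement) =====
-- stated objective: simpler
-- what changed: Replaces the three-boolean-flag per-character state machine with str.partition at the opening and closing angle-bracket delimiters to cut out the segment, then a single scan that returns the slice from the first alphanumeric character.
import Mathlib
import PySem

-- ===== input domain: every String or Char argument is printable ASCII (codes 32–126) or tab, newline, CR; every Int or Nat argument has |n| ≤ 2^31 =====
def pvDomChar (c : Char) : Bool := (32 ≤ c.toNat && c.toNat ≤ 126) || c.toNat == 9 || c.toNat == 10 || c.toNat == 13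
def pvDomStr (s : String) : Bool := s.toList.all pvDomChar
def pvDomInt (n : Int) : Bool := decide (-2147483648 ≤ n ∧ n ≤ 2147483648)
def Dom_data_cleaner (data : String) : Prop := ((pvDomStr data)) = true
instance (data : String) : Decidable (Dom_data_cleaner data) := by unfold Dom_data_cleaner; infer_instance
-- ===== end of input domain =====

-- B replaces A's boolean-flag state machine by partition-at-'>' / partition-at-'<' plus a
-- slice from the first alphanumeric character (objective: simpler; return value only, no mutation).

-- ===== PORT A =====
-- literal port of A's loop: state (data_cleaned, check1, check2, check3)
def dcStep (st : List Char × Bool × Bool × Bool) (i : Char) : List Char × Bool × Bool × Bool :=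
  let acc := st.1
  let c1 := if i = '>' then true else st.2.1
  let c2 := if i = '<' ∧ c1 = true then true else st.2.2.1
  let c3 := st.2.2.2
  if c1 = true ∧ c2 = false then
    let c3 := if PySem.Chars.isalnum i = true then true else c3
    let acc := if c3 = true then acc ++ [i] else acc
    (acc, c1, c2, c3)
  else (acc, c1, c2, c3)

def data_cleaner (data : String) : String :=
  String.ofList (data.toList.foldl dcStep ([], false, false, false)).1

-- ===== PORT B =====
-- str.partition(c) for a one-char separator: (head, found?, tail after the separator)
def dcPartition (sep : Char) : List Char → List Char × Bool × List Char
  | [] => ([], false, [])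
  | c :: rest =>
    if c = sep then ([], true, rest)
    else
      let r := dcPartition sep rest
      (c :: r.1, r.2.1, r.2.2)

-- the 'for j, c in enumerate(seg): if c.isalnum(): return seg[j:]' loop: seg[j:] = c :: rest
def dcFromAlnum : List Char → List Char
  | [] => []
  | c :: rest => if PySem.Chars.isalnum c = true then c :: rest else dcFromAlnum rest

def data_cleaner_alt (data : String) : String :=
  let p := dcPartition '>' data.toList
  if p.2.1 = false then ""
  else String.ofList (dcFromAlnum (dcPartition '<' p.2.2).1)

-- ===== PRECONDITION & SPEC =====
def Spec_data_cleaner (data : String) (out : String) : Prop := out = data_cleaner_alt data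
instance (data : String) (out : String) : Decidable (Spec_data_cleaner data out) := by unfold Spec_data_cleaner; infer_instance

-- ===== CLAIM (what is proved, stated in full; the proofs are below) =====
def Claim_equal_data_cleaner : Prop := ∀ (data : String), Dom_data_cleaner data → Spec_data_cleaner data (data_cleaner data)

-- ===== LEMMAS AND PROOFS =====

-- after check2 became true the loop never changes the state
lemma dc_done (m : List Char) (acc : List Char) (c3 : Bool) :
    m.foldl dcStep (acc, true, true, c3) = (acc, true, true, c3) := by
  induction m with
  | nil => rfl
  | cons h t ih => simpa [List.foldl, dcStep] using ih

-- phase: check1 ∧ check3 set — everything up to the first '<' is appended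
lemma dc_copy (m : List Char) (acc : List Char) :
    (m.foldl dcStep (acc, true, false, true)).1 = acc ++ m.takeWhile (· ≠ '<') := by
  induction m generalizing acc with
  | nil => simp
  | cons h t ih =>
    by_cases hlt : h = '<'
    · subst hlt
      simp [List.foldl, dcStep, dc_done, List.takeWhile]
    · simp only [List.foldl, dcStep, hlt]
      rcases Bool.dichotomy (PySem.Chars.isalnum h) with ha | ha <;>
        simp [ha, hlt, ih, List.append_assoc]

-- phase: check1 set, check3 not yet — skip until the first alphanumeric (or stop at '<')
lemma dc_skip (m : List Char) (acc : List Char) :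
    (m.foldl dcStep (acc, true, false, false)).1
      = acc ++ dcFromAlnum (m.takeWhile (· ≠ '<')) := by
  induction m generalizing acc with
  | nil => simp [dcFromAlnum]
  | cons h t ih =>
    by_cases hlt : h = '<'
    · subst hlt
      simp [List.foldl, dcStep, dc_done, List.takeWhile, dcFromAlnum]
    · by_cases ha : PySem.Chars.isalnum h = true
      · simp [List.foldl, dcStep, hlt, ha, dc_copy, dcFromAlnum]
      · simp only [Bool.not_eq_true] at ha
        simp [List.foldl, dcStep, hlt, ha, ih, dcFromAlnum]

-- dcPartition's head piece is takeWhile (· ≠ sep)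
lemma dcPartition_fst (sep : Char) (l : List Char) :
    (dcPartition sep l).1 = l.takeWhile (· ≠ sep) := by
  induction l with
  | nil => rfl
  | cons h t ih =>
    by_cases hs : h = sep <;> simp [dcPartition, hs, ih]

-- phase 0: before the first '>' nothing happens; '>' flips check1
lemma dc_start (l : List Char) :
    (l.foldl dcStep ([], false, false, false)).1
      = (let p := dcPartition '>' l;
         if p.2.1 = false then [] else dcFromAlnum ((dcPartition '<' p.2.2).1)) := by
  induction l with
  | nil => rfl
  | cons h t ih =>
    by_cases hg : h = '>'
    · subst hg
      have ha : PySem.Chars.isalnum '>' = false := rfl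
      simp [List.foldl, dcStep, ha, dc_skip, dcPartition, dcPartition_fst]
    · simpa [List.foldl, dcStep, hg, dcPartition] using ih

-- ===== VERDICT (by name: the statement is the Claim_ definition above) =====
theorem data_cleaner_spec : Claim_equal_data_cleaner := by
  intro data _
  unfold Spec_data_cleaner data_cleaner data_cleaner_alt
  rw [dc_start]
  set p := dcPartition '>' data.toList
  by_cases hp : p.2.1 = false <;> simp [hp]
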